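-- pv_equiv track=rewrite | github.com/Shahaf-Yamin/Radar-Moving-Target-Classification-Via-CNN | src/fit_history_vis.py | csv_to_dict
-- ===== SOURCE A (Python) =====
-- import collections
--
-- def csv_to_dict(csv_data):
--     is_first_line = True
--     csv_dict = collections.OrderedDict()
--     for line in csv_data:
--         if is_first_line:
--             is_first_line = False
--             for key in line:
--                 csv_dict[key] = []
--         else:
--             for key, data in zip(csv_dict.keys(), line):
--                 csv_dict[key].append(data)
--     return csv_dict
-- ===== SOURCE B (Python) =====
-- import collections
--
-- def csv_to_dict(csv_data):
--     rows = list(csv_data)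
--     if not rows:
--         return collections.OrderedDict()
--     header, data = rows[0], rows[1:]
--     return collections.OrderedDict(
--         (key, [line[j] for line in data if j < len(line)])
--         for j, key in enumerate(header))
-- ===== Notes on version B (the rewrite author's own statement) =====
-- stated objective: alternative
-- what changed: B materialises the rows, splits off the header, and builds the dict column by column with one comprehension per header key instead of A's stateful row-by-row loop that appends into pre-created lists.
-- outside the precondition, e.g. on csv_to_dict([['a', 'a'], ['1', '2']]): A returns {'a': ['1']}, B returns {'a': ['2']}
import Mathlib
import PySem

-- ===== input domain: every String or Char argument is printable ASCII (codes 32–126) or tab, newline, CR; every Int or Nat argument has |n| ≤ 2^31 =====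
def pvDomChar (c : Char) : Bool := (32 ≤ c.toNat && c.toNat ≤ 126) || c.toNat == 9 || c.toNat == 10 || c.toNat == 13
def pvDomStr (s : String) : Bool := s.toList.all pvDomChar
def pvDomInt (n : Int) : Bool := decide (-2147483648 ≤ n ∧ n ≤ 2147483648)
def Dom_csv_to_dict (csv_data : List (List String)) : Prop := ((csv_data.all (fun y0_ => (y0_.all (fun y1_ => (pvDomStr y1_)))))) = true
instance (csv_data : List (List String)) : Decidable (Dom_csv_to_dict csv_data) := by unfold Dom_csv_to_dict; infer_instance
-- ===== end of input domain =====

-- B builds the dict column by column (one comprehension per header key) instead of A's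
-- stateful row loop; same cost, different decomposition ("alternative").

-- ===== PORT A =====
def csv_to_dict (csv_data : List (List String)) : List (String × List String) :=
  (csv_data.foldl
    (fun (st : Bool × PySem.Dict String (List String)) line =>
      if st.1 then
        (false, line.foldl (fun d key => d.insert key ([] : List String)) st.2)
      else
        (st.1, (st.2.keys.zip line).foldl
          (fun d kv => d.modify kv.1 [] (fun xs => xs ++ [kv.2])) st.2))
    (true, PySem.Dict.empty)).2.items

-- ===== PORT B =====
def csv_to_dict_alt (csv_data : List (List String)) : List (String × List String) :=
  match csv_data with
  | [] => (PySem.Dict.empty : PySem.Dict String (List String)).items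
  | header :: data =>
      (PySem.Dict.ofList ((PySem.List.enumerate header 0).map
        (fun jk => (jk.2, data.filterMap (fun line => PySem.List.pyGet? line jk.1))))).items

-- ===== PRECONDITION & SPEC =====
-- Pre_ excludes inputs whose header row has duplicate keys: there A's per-key append and
-- B's dict-constructor overwrite resolve the duplicate differently, and neither choice is specified.
def Pre_csv_to_dict (csv_data : List (List String)) : Prop := (csv_data.headD []).Nodup
instance (csv_data : List (List String)) : Decidable (Pre_csv_to_dict csv_data) := by unfold Pre_csv_to_dict; infer_instance
def pvWitness_csv_to_dict : List (List String) := [["a", "b"], ["1", "2"], ["3"]]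

def Spec_csv_to_dict (csv_data : List (List String)) (out : List (String × List String)) : Prop := out = csv_to_dict_alt csv_data
instance (csv_data : List (List String)) (out : List (String × List String)) : Decidable (Spec_csv_to_dict csv_data out) := by unfold Spec_csv_to_dict; infer_instance

-- ===== CLAIM (what is proved, stated in full; the proofs are below) =====
def Claim_equal_csv_to_dict : Prop := ∀ (csv_data : List (List String)), Dom_csv_to_dict csv_data → Pre_csv_to_dict csv_data → Spec_csv_to_dict csv_data (csv_to_dict csv_data)

-- ===== LEMMAS AND PROOFS =====

-- one data row of A's loop
def pvRowStep (d : PySem.Dict String (List String)) (line : List String) : PySem.Dict String (List String) :=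
  (d.keys.zip line).foldl (fun d kv => d.modify kv.1 [] (fun xs => xs ++ [kv.2])) d

-- the boolean flag stays false after the first row
theorem pv_flag_false (data : List (List String)) (d : PySem.Dict String (List String)) :
    data.foldl
      (fun (st : Bool × PySem.Dict String (List String)) line =>
        if st.1 then
          (false, line.foldl (fun d key => d.insert key ([] : List String)) st.2)
        else
          (st.1, (st.2.keys.zip line).foldl
            (fun d kv => d.modify kv.1 [] (fun xs => xs ++ [kv.2])) st.2))
      (false, d) = (false, data.foldl pvRowStep d) := by
  induction data generalizing d with
  | nil => rfl
  | cons l t ih => simpa [pvRowStep] using ih (pvRowStep d l)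

theorem pv_getD_header_init (header : List String) (k : String)
    (d : PySem.Dict String (List String)) (h : d.getD k [] = []) :
    (header.foldl (fun d key => d.insert key ([] : List String)) d).getD k [] = [] := by
  induction header generalizing d with
  | nil => exact h
  | cons x t ih =>
      simp only [List.foldl_cons]
      exact ih _ (by rw [PySem.Dict.getD_insert]; split <;> simp [h])

theorem pv_keys_init (header : List String) (hnd : header.Nodup) :
    (header.foldl (fun d key => d.insert key ([] : List String)) (PySem.Dict.empty)).keys = header := by
  rw [PySem.Dict.keys_foldl_insert (f := fun _ _ => ([] : List String))]
  simp [PySem.Set.update_nil_left, PySem.Set.ofList_eq_self_of_nodup _ hnd]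

theorem pv_update_self {α : Type} [DecidableEq α] (s xs : List α) (h : ∀ x ∈ xs, x ∈ s) :
    PySem.Set.update s xs = s := by
  rw [PySem.Set.update_eq_append_filter]
  have : (PySem.Set.ofList xs).filter (fun y => !(PySem.Set.contains s y)) = [] := by
    rw [List.filter_eq_nil_iff]
    intro y hy
    simp [PySem.Set.contains, h y ((PySem.Set.mem_ofList _ _).1 hy)]
  rw [this, List.append_nil]

theorem pv_keys_row (d : PySem.Dict String (List String)) (line header : List String)
    (hk : d.keys = header) : (pvRowStep d line).keys = header := by
  unfold pvRowStep
  rw [PySem.Dict.keys_foldl_modify_key (key := Prod.fst)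
        (f := fun d kv => (fun xs => xs ++ [kv.2]))]
  rw [hk]
  refine pv_update_self _ _ ?_
  intro x hx
  obtain ⟨p, hp, rfl⟩ := List.mem_map.1 hx
  exact (List.of_mem_zip hp).1

-- the filtered zip at a nodup header picks out exactly column j of the row
theorem pv_zip_filter (header line : List String) (j : Nat) (hnd : header.Nodup)
    (hj : j < header.length) :
    ((header.zip line).filter (fun p => p.1 == header[j])).map (·.2) = (getElem? line j).toList := by
  induction header generalizing line j with
  | nil => simp at hj
  | cons h t ih =>
      cases line with
      | nil => simp
      | cons x xs =>
          have hnt : h ∉ t := (List.nodup_cons.1 hnd).1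
          cases j with
          | zero =>
              have hz : ((t.zip xs).filter (fun p => p.1 == h)) = [] := by
                rw [List.filter_eq_nil_iff]
                intro p hp hb
                have h1 : p.1 ∈ t := (List.of_mem_zip hp).1
                rw [show p.1 = h by simpa using hb] at h1
                exact hnt h1
              simp only [List.zip_cons_cons, List.getElem_cons_zero, List.filter_cons]
              rw [show ((h, x).1 == h) = true by simp, hz]
              simp
          | succ j =>
              have hj' : j < t.length := by simpa using hj
              have hne : (h == t[j]) = false := by
                simp only [beq_eq_false_iff_ne, ne_eq]
                intro he; exact hnt (he ▸ List.getElem_mem hj')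
              simp only [List.zip_cons_cons, List.getElem_cons_succ, List.filter_cons, hne]
              exact ih xs j (List.nodup_cons.1 hnd).2 hj'

-- loop invariant: folding A's row step accumulates column j at key header[j]
theorem pv_fold_invariant (header : List String) (hnd : header.Nodup)
    (data : List (List String)) (d : PySem.Dict String (List String)) (hk : d.keys = header) :
    (data.foldl pvRowStep d).keys = header ∧
    ∀ j (hj : j < header.length),
      (data.foldl pvRowStep d).getD header[j] [] =
        d.getD header[j] [] ++ data.filterMap (fun line => getElem? line j) := by
  induction data generalizing d with
  | nil => exact ⟨hk, fun j hj => by simp⟩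
  | cons line t ih =>
      obtain ⟨hk', hv⟩ := ih (pvRowStep d line) (pv_keys_row d line header hk)
      refine ⟨hk', fun j hj => ?_⟩
      rw [List.foldl_cons, hv j hj]
      unfold pvRowStep
      rw [PySem.Dict.getD_foldl_modify_append, hk, pv_zip_filter header line j hnd hj]
      cases h : getElem? line j <;> simp [h]

theorem pv_items_ofList_nodup {ν : Type} (pairs : List (String × ν))
    (hnd : (pairs.map (·.1)).Nodup) : (PySem.Dict.ofList pairs).items = pairs := by
  have := PySem.Dict.items_foldl_insert_fresh (l := pairs) (k := Prod.fst) (v := Prod.snd)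
      (d := PySem.Dict.empty) (by intro a _; simp) hnd
  simpa [PySem.Dict.ofList] using this

-- ===== VERDICT (by name: the statement is the Claim_ definition above) =====
theorem csv_to_dict_spec : Claim_equal_csv_to_dict := by
  intro csv_data _ hpre
  unfold Spec_csv_to_dict
  cases csv_data with
  | nil => rfl
  | cons header data =>
      have hnd : header.Nodup := by simpa [Pre_csv_to_dict] using hpre
      unfold csv_to_dict csv_to_dict_alt
      simp only [List.foldl_cons, if_pos]
      rw [pv_flag_false]
      obtain ⟨hk, hv⟩ := pv_fold_invariant header hnd data _ (pv_keys_init header hnd)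
      rw [PySem.Dict.items_eq_map_keys _ (by rw [hk]; exact hnd) ([] : List String), hk]
      have hpk : ((PySem.List.enumerate header 0).map
          (fun jk => (jk.2, data.filterMap (fun line => PySem.List.pyGet? line jk.1)))).map (·.1)
          = header := by
        rw [List.map_map]
        exact PySem.List.map_snd_enumerate header 0
      rw [pv_items_ofList_nodup _ (by rw [hpk]; exact hnd)]
      apply List.ext_getElem
      · simp [PySem.List.length_enumerate]
      · intro i h1 h2
        have hi : i < header.length := by simpa using h1
        rw [List.getElem_map, List.getElem_map, PySem.List.getElem_enumerate]
        have hD0 : (header.foldl (fun d key => d.insert key ([] : List String))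
            PySem.Dict.empty).getD header[i] [] = [] :=
          pv_getD_header_init header _ _ (by simp)
        rw [hv i hi, hD0]
        simp [PySem.List.pyGet?_natCast]
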